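-- pv_equiv track=rewrite | github.com/Shahraaz/CP_P_S5 | ICPC_Mirrors/Nitc_9.0/nwerc2019all/kitesurfing/generators/generate.py | from_lengths
-- ===== SOURCE A (Python) =====
-- def from_lengths(water, land):
--     distance = 0
--     intervals = []
--     for k in range(len(land)):
--         distance += water[k]
--         intervals.append((distance, distance+land[k]))
--         distance += land[k]
--     distance += water[-1]
--     return (distance, intervals)
-- ===== SOURCE B (Python) =====
-- def from_lengths(water, land):
--     # Interleave the lengths into one flat sequence ending with the last water stretch,
--     # take running prefix sums, then pair them up by index.
--     seq = []
--     for k in range(len(land)):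
--         seq.append(water[k])
--         seq.append(land[k])
--     seq.append(water[-1])
--     cum = []
--     s = 0
--     for x in seq:
--         s += x
--         cum.append(s)
--     intervals = [(cum[2 * k], cum[2 * k + 1]) for k in range(len(land))]
--     return (cum[-1], intervals)
-- ===== Notes on version B (the rewrite author's own statement) =====
-- stated objective: alternative
-- what changed: Instead of accumulating distance and appending intervals inside one loop, B builds a flat interleaved list of lengths, computes its full prefix-sum array, and forms the intervals by index-pairing consecutive prefix sums.
import Mathlib
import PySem

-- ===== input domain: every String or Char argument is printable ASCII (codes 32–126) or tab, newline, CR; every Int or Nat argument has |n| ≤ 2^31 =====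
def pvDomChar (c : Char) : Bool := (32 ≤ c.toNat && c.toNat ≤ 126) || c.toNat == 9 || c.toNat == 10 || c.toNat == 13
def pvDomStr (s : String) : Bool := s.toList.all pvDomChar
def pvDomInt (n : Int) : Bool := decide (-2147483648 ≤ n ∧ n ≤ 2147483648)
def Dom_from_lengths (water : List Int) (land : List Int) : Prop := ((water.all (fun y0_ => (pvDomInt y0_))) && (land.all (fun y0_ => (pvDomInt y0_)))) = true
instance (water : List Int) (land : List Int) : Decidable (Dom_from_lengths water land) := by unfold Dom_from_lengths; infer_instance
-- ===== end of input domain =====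

-- B replaces A's accumulate-and-append loop by a flat interleaved length list, its full
-- prefix-sum array, and index-pairing of consecutive prefix sums (objective: alternative).

-- ===== PORT A =====
def from_lengths (water : List Int) (land : List Int) : Int × (List (Int × Int)) :=
  let r := (PySem.List.pyRange 0 (land.length : Int) 1).foldl
    (fun (st : Int × List (Int × Int)) k =>
      let d := st.1 + PySem.List.pyGetD water k 0
      (d + PySem.List.pyGetD land k 0, st.2 ++ [(d, d + PySem.List.pyGetD land k 0)]))
    (0, [])
  (r.1 + PySem.List.pyGetD water (-1) 0, r.2)

-- ===== PORT B =====
def from_lengths_alt (water : List Int) (land : List Int) : Int × (List (Int × Int)) :=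
  let seq0 := (PySem.List.pyRange 0 (land.length : Int) 1).foldl
    (fun (acc : List Int) k => acc ++ [PySem.List.pyGetD water k 0, PySem.List.pyGetD land k 0]) []
  let seq := seq0 ++ [PySem.List.pyGetD water (-1) 0]
  let cum := (seq.foldl (fun (p : Int × List Int) x => (p.1 + x, p.2 ++ [p.1 + x])) (0, [])).2
  let intervals := (PySem.List.pyRange 0 (land.length : Int) 1).map
    (fun k => (PySem.List.pyGetD cum (2 * k) 0, PySem.List.pyGetD cum (2 * k + 1) 0))
  (PySem.List.pyGetD cum (-1) 0, intervals)

-- ===== PRECONDITION & SPEC =====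
-- Pre_ excludes exactly the inputs where Python A raises IndexError: water[-1] on empty
-- water, or water[k] with len(land) > len(water).
def Pre_from_lengths (water : List Int) (land : List Int) : Prop :=
  water ≠ [] ∧ land.length ≤ water.length
instance (water : List Int) (land : List Int) : Decidable (Pre_from_lengths water land) := by
  unfold Pre_from_lengths; infer_instance
def pvWitness_from_lengths : List Int × List Int := ([1, 2], [3])

def Spec_from_lengths (water : List Int) (land : List Int) (out : Int × (List (Int × Int))) : Prop := out = from_lengths_alt water land
instance (water : List Int) (land : List Int) (out : Int × (List (Int × Int))) : Decidable (Spec_from_lengths water land out) := by unfold Spec_from_lengths; infer_instance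

-- ===== CLAIM (what is proved, stated in full; the proofs are below) =====
def Claim_equal_from_lengths : Prop := ∀ (water : List Int) (land : List Int), Dom_from_lengths water land → Pre_from_lengths water land → Spec_from_lengths water land (from_lengths water land)

-- ===== LEMMAS AND PROOFS =====

-- running distance after n loop iterations
def pvD (w l : List Int) (n : Nat) : Int := (w.take n).sum + (l.take n).sum
-- interval list after n loop iterations
def pvIv (w l : List Int) (n : Nat) : List (Int × Int) :=
  (List.range n).map (fun k => (pvD w l k + w.getD k 0, pvD w l k + w.getD k 0 + l.getD k 0))
-- running prefix sums starting from s (B's cum list)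
def pvCums (s : Int) : List Int → List Int
  | [] => []
  | x :: xs => (s + x) :: pvCums (s + x) xs
-- B's interleaved sequence of the first n water/land lengths
def pvFlat (w l : List Int) (n : Nat) : List Int :=
  (List.range n).flatMap (fun k => [w.getD k 0, l.getD k 0])

lemma pv_sum_take_succ (xs : List Int) (n : Nat) :
    (xs.take (n + 1)).sum = (xs.take n).sum + xs.getD n 0 := by
  rw [List.take_add_one, List.sum_append, List.getD_eq_getElem?_getD]
  cases xs[n]? <;> simp

lemma pvD_succ (w l : List Int) (n : Nat) :
    pvD w l (n + 1) = pvD w l n + w.getD n 0 + l.getD n 0 := by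
  simp [pvD, pv_sum_take_succ]; ring

lemma pvIv_succ (w l : List Int) (n : Nat) :
    pvIv w l (n + 1) = pvIv w l n ++ [(pvD w l n + w.getD n 0, pvD w l n + w.getD n 0 + l.getD n 0)] := by
  simp [pvIv, List.range_succ]

lemma loopA (w l : List Int) (n : Nat) :
    (List.range n).foldl (fun (st : Int × List (Int × Int)) (k : Nat) =>
        let d := st.1 + w.getD k 0
        (d + l.getD k 0, st.2 ++ [(d, d + l.getD k 0)])) (0, []) = (pvD w l n, pvIv w l n) := by
  induction n with
  | zero => simp [pvD, pvIv]
  | succ m ih =>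
    rw [List.range_succ, List.foldl_append, ih]
    simp only [List.foldl_cons, List.foldl_nil]
    rw [pvIv_succ, pvD_succ]

lemma pvCums_append (s : Int) (xs ys : List Int) :
    pvCums s (xs ++ ys) = pvCums s xs ++ pvCums (s + xs.sum) ys := by
  induction xs generalizing s with
  | nil => simp [pvCums]
  | cons x xs ih => simp [pvCums, ih, add_assoc]

lemma loopCum (xs : List Int) (s : Int) (acc : List Int) :
    xs.foldl (fun (p : Int × List Int) x => (p.1 + x, p.2 ++ [p.1 + x])) (s, acc)
      = (s + xs.sum, acc ++ pvCums s xs) := by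
  induction xs generalizing s acc with
  | nil => simp [pvCums]
  | cons x xs ih => simp [pvCums, ih, add_assoc]

lemma pvFlat_succ (w l : List Int) (n : Nat) :
    pvFlat w l (n + 1) = pvFlat w l n ++ [w.getD n 0, l.getD n 0] := by
  simp [pvFlat, List.range_succ]

lemma pvFlat_sum (w l : List Int) (n : Nat) : (pvFlat w l n).sum = pvD w l n := by
  induction n with
  | zero => simp [pvFlat, pvD]
  | succ m ih =>
    rw [pvFlat_succ, List.sum_append, ih, pvD_succ]
    simp [add_assoc]

lemma pvCums_flat (w l : List Int) (n : Nat) :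
    pvCums 0 (pvFlat w l n) = (pvIv w l n).flatMap (fun p => [p.1, p.2]) := by
  induction n with
  | zero => simp [pvFlat, pvIv, pvCums]
  | succ m ih =>
    rw [pvFlat_succ, pvCums_append, ih, pvIv_succ]
    simp [pvCums, pvFlat_sum, add_assoc]

lemma pv_flatMap_pair_fst (P : List (Int × Int)) (k : Nat) (h : k < P.length) :
    (P.flatMap (fun p => [p.1, p.2]))[2 * k]? = some (P[k].1) := by
  induction P generalizing k with
  | nil => simp at h
  | cons p P ih =>
    cases k with
    | zero => simp
    | succ m =>
      have : 2 * (m + 1) = (2 * m) + 2 := by ring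
      simp only [this, List.flatMap_cons]
      rw [List.getElem?_append_right (by simp)]
      simpa using ih m (by simpa using h)

lemma pv_flatMap_pair_snd (P : List (Int × Int)) (k : Nat) (h : k < P.length) :
    (P.flatMap (fun p => [p.1, p.2]))[2 * k + 1]? = some (P[k].2) := by
  induction P generalizing k with
  | nil => simp at h
  | cons p P ih =>
    cases k with
    | zero => simp
    | succ m =>
      have : 2 * (m + 1) + 1 = (2 * m + 1) + 2 := by ring
      simp only [this, List.flatMap_cons]
      rw [List.getElem?_append_right (by simp)]
      simpa using ih m (by simpa using h)

lemma pv_length_flatpair (P : List (Int × Int)) :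
    (P.flatMap (fun p => [p.1, p.2])).length = 2 * P.length := by
  induction P with
  | nil => rfl
  | cons p P ih => simp [ih]; ring

lemma pv_main (w l : List Int) : from_lengths w l = from_lengths_alt w l := by
  unfold from_lengths from_lengths_alt
  simp only [PySem.List.pyRange_zero_nat, List.foldl_map, List.map_map,
    PySem.List.pyGetD_natCast]
  rw [loopA, PySem.List.foldl_append_eq_flatMap (fun k : Nat => [w.getD k 0, l.getD k 0]),
    List.nil_append]
  have hflat : (List.flatMap (fun k : Nat => [w.getD k 0, l.getD k 0]) (List.range l.length))
      = pvFlat w l l.length := rfl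
  rw [hflat, loopCum, pvCums_append, pvCums_flat, pvFlat_sum, List.nil_append]
  simp only [pvCums, zero_add]
  rw [PySem.List.pyGetD_neg_one_append_singleton]
  refine Prod.ext rfl ?_
  apply List.ext_getElem
  · simp [pvIv]
  · intro j hj hj'
    have hjn : j < l.length := by simpa [pvIv] using hj
    have hP : j < (pvIv w l l.length).length := by simpa [pvIv] using hjn
    have hlenF : ((pvIv w l l.length).flatMap (fun p => [p.1, p.2])).length = 2 * l.length := by
      rw [pv_length_flatpair]; simp [pvIv]
    have c1 : (2 * ((j : Nat) : Int)) = ((2 * j : Nat) : Int) := by push_cast; ring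
    have c2 : ((2 * j : Nat) : Int) + 1 = ((2 * j + 1 : Nat) : Int) := by push_cast; ring
    simp only [List.getElem_map, List.getElem_range, Function.comp_apply, c1, c2,
      PySem.List.pyGetD_natCast, List.getD_eq_getElem?_getD]
    rw [List.getElem?_append_left
        (show 2 * j < (List.flatMap (fun p : Int × Int => [p.1, p.2]) (pvIv w l l.length)).length by
          rw [hlenF]; omega),
      List.getElem?_append_left
        (show 2 * j + 1 < (List.flatMap (fun p : Int × Int => [p.1, p.2]) (pvIv w l l.length)).length by
          rw [hlenF]; omega)]
    rw [pv_flatMap_pair_fst _ _ hP, pv_flatMap_pair_snd _ _ hP]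
    simp

theorem from_lengths_spec : Claim_equal_from_lengths := by
  intro water land _ _
  unfold Spec_from_lengths
  exact pv_main water land
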